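-- pv_equiv track=rewrite | github.com/andreimacavei/gnome-signing | keysign/gpg/gpg.py | format_fpr
-- ===== SOURCE A (Python) =====
-- def format_fpr(fpr):
--     """display a clean version of the fingerprint
--
--     this is the display we usually see
--     """
--     l = list(fpr) # explode
--     s = ''
--     for i in range(10):
--         # output 4 chars
--         s += ''.join(l[4*i:4*i+4])
--         # add a space, except at the end
--         if i < 9: s += ' '
--         # add an extra space in the middle
--         if i == 4: s += ' '
--     return s
-- ===== SOURCE B (Python) =====
-- def format_fpr(fpr):
--     """display a clean version of the fingerprint
--
--     this is the display we usually see
--     """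
--     def emit(chars, remaining):
--         group = ''.join(chars[:4])
--         if remaining == 1:
--             return group
--         sep = '  ' if remaining == 6 else ' '
--         return group + sep + emit(chars[4:], remaining - 1)
--     return emit(list(fpr), 10)
-- ===== Notes on version B (the rewrite author's own statement) =====
-- stated objective: alternative
-- what changed: Replaces A's indexed for-loop over range(10) with append-and-conditional-space accumulation by a recursive emitter that consumes the character list four at a time with a countdown, choosing the separator per call and returning the last group bare at the base case.
import Mathlib
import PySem

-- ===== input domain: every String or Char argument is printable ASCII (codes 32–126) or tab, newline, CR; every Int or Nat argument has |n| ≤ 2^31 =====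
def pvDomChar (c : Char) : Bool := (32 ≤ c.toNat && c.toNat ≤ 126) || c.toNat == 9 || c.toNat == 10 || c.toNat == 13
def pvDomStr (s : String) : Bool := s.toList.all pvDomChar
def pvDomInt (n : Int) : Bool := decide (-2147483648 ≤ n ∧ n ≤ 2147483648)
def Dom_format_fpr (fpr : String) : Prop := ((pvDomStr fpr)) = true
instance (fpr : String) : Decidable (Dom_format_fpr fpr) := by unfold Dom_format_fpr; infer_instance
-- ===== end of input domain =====

-- B replaces A's index loop (with its i<9 / i==4 spacing branches) by a recursive emitter
-- consuming the list four chars at a time with a countdown (alternative decomposition, same output).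

-- ===== PORT A =====
-- literal port of A: explode the string, fold over range(10), appending the 4-char
-- slice l[4*i:4*i+4], a space for i < 9, and an extra space for i == 4
def format_fpr (fpr : String) : String :=
  let l := fpr.toList
  let s := (PySem.List.pyRange 0 10 1).foldl (fun s i =>
    let s := s ++ PySem.List.slice l (some (4*i)) (some (4*i+4))
    let s := if i < 9 then s ++ [' '] else s
    if i == 4 then s ++ [' '] else s) ([] : List Char)
  String.ofList s

-- ===== PORT B =====
-- literal port of B's recursive 'emit': take group chars[:4]; at remaining == 1 return it;
-- otherwise append the separator ('  ' when remaining == 6, else ' ') and recurse on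
-- chars[4:] with remaining - 1.  Python's emit is never called with remaining = 0
-- (it would not terminate there); the Lean 0-case returns [] and is unreachable from 10.
def fmtEmit (chars : List Char) : Nat → List Char
  | 0 => []
  | 1 => PySem.List.slice chars none (some 4)
  | (n+2) =>
      PySem.List.slice chars none (some 4)
        ++ (if n + 2 == 6 then [' ', ' '] else [' '])
        ++ fmtEmit (PySem.List.slice chars (some 4) none) (n+1)

def format_fpr_alt (fpr : String) : String :=
  String.ofList (fmtEmit fpr.toList 10)

-- ===== PRECONDITION & SPEC =====
def Spec_format_fpr (fpr : String) (out : String) : Prop := out = format_fpr_alt fpr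
instance (fpr : String) (out : String) : Decidable (Spec_format_fpr fpr out) := by unfold Spec_format_fpr; infer_instance

-- ===== CLAIM =====
def Claim_equal_format_fpr : Prop := ∀ (fpr : String), Dom_format_fpr fpr → Spec_format_fpr fpr (format_fpr fpr)

-- ===== LEMMAS AND PROOFS =====

-- ===== VERDICT =====
set_option maxHeartbeats 1000000 in
theorem format_fpr_spec : Claim_equal_format_fpr := by
  intro fpr _
  unfold Spec_format_fpr format_fpr format_fpr_alt
  simp [PySem.List.pyRange, List.range_succ, fmtEmit, PySem.List.slice_toNat,
    PySem.List.slice_to, PySem.List.slice_from, List.drop_drop, List.append_assoc]
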